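-- pv_equiv track=rewrite | github.com/ratnagaurav/edyst | compiler design.py | insidemain
-- ===== SOURCE A (Python) =====
-- def insidemain(s):
--     stack=[]
--     for i in s:
--         if i=='(' or i==')':
--             return False
--         elif i=='{':
--             stack.append(i)
--         elif i=='}':
--             try:
--                 if stack[-1]=='{':
--                     stack.pop()
--             except:
--                 return False
--     if stack==[]:
--         return True
--     return False
-- ===== SOURCE B (Python) =====
-- def insidemain(s):
--     t = ''.join(c for c in s if c in '(){}')
--     if '(' in t or ')' in t:
--         return False
--     while '{}' in t:
--         t = t.replace('{}', '')
--     return t == ''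
-- ===== Notes on version B (the rewrite author's own statement) =====
-- stated objective: alternative
-- what changed: Replaced A's left-to-right scan with an explicit stack by a rewriting algorithm: filter the string to bracket symbols, reject any parenthesis, then repeatedly delete adjacent open-close brace pairs until a fixpoint and test for emptiness.
import Mathlib
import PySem

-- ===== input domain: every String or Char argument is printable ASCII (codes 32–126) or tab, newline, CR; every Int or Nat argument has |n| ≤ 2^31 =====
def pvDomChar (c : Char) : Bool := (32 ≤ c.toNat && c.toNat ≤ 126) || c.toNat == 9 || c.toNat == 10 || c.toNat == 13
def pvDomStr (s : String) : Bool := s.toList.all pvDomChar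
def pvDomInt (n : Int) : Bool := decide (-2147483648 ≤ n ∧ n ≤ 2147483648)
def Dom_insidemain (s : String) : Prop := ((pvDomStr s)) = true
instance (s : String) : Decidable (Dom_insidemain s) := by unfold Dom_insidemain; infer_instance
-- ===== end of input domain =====

-- B replaces A's stack scan by a different algorithm: filter to bracket symbols, reject
-- parentheses, then repeatedly delete "{}" substrings; balanced iff the fixpoint is empty.

-- ===== PORT A =====
-- A's loop: early return False on '(' / ')'; push '{'; on '}', stack[-1] raises on empty
-- stack (→ except → return False), otherwise pop if it is '{'.
def insidemainGoA : List Char → List Char → Bool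
  | [], stack => stack == []
  | c :: rest, stack =>
    if c = '(' ∨ c = ')' then false
    else if c = '{' then insidemainGoA rest (stack ++ ['{'])
    else if c = '}' then
      match stack.getLast? with
      | none => false              -- stack[-1] raises IndexError → except → return False
      | some x => if x = '{' then insidemainGoA rest stack.dropLast else insidemainGoA rest stack
    else insidemainGoA rest stack

def insidemain (s : String) : Bool := insidemainGoA s.toList []

-- ===== PORT B =====
-- the filter in t = ''.join(c for c in s if c in '(){}')
def bKeep (c : Char) : Bool := c == '(' || c == ')' || c == '{' || c == '}'

-- one t.replace('{}', ''): delete all non-overlapping "{}" occurrences, left to right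
def bReplaceAll : List Char → List Char
  | '{' :: '}' :: r => bReplaceAll r
  | c :: r => c :: bReplaceAll r
  | [] => []

-- the while-condition '{}' in t (substring test)
def bHasPair : List Char → Bool
  | [] => false
  | c :: r => (c == '{' && r.head? == some '}') || bHasPair r

-- termination measure for the while loop (cited by bReduce's decreasing_by)
theorem bReplaceAll_length_le (t : List Char) : (bReplaceAll t).length ≤ t.length := by
  induction t using bReplaceAll.induct with
  | case1 r ih => simp only [bReplaceAll, List.length_cons]; omega
  | case2 c r hne ih => rw [bReplaceAll.eq_2 c r hne]; simp only [List.length_cons]; omega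
  | case3 => simp [bReplaceAll]

theorem bReplaceAll_length_lt (t : List Char) (h : bHasPair t = true) :
    (bReplaceAll t).length < t.length := by
  induction t using bReplaceAll.induct with
  | case1 r ih =>
    have := bReplaceAll_length_le r
    simp only [bReplaceAll, List.length_cons]; omega
  | case2 c r hne ih =>
    simp only [bHasPair, Bool.or_eq_true, Bool.and_eq_true, beq_iff_eq] at h
    rcases h with ⟨hc, hh⟩ | h
    · cases r with
      | nil => simp at hh
      | cons d r' =>
        simp only [List.head?_cons, Option.some.injEq] at hh
        exact (hne r' hc (by rw [hh])).elim
    · rw [bReplaceAll.eq_2 c r hne]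
      simp only [List.length_cons]
      exact Nat.succ_lt_succ (ih h)
  | case3 => simp [bHasPair] at h

-- while '{}' in t: t = t.replace('{}','')
def bReduce (t : List Char) : List Char :=
  if h : bHasPair t = true then bReduce (bReplaceAll t) else t
termination_by t.length
decreasing_by exact bReplaceAll_length_lt t h

-- body applied to t = the filtered character list
def insidemainAltBody (t : List Char) : Bool :=
  if t.contains '(' || t.contains ')' then false
  else bReduce t == []

def insidemain_alt (s : String) : Bool :=
  insidemainAltBody (s.toList.filter bKeep)

-- ===== PRECONDITION & SPEC =====
def Spec_insidemain (s : String) (out : Bool) : Prop := out = insidemain_alt s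
instance (s : String) (out : Bool) : Decidable (Spec_insidemain s out) := by unfold Spec_insidemain; infer_instance

-- ===== CLAIM (what is proved, stated in full; the proofs are below) =====
def Claim_equal_insidemain : Prop := ∀ (s : String), Dom_insidemain s → Spec_insidemain s (insidemain s)

-- ===== LEMMAS AND PROOFS =====

-- proof-only counter characterisation of brace balance
def balAux : List Char → Nat → Bool
  | [], n => n == 0
  | c :: r, n =>
    if c = '{' then balAux r (n + 1)
    else if c = '}' then (match n with | 0 => false | Nat.succ m => balAux r m)
    else balAux r n

theorem insidemainGoA_paren (l : List Char) :
    ∀ stack : List Char, l.any (fun c => c == '(' || c == ')') = true →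
      insidemainGoA l stack = false := by
  induction l with
  | nil => intro stack h; simp at h
  | cons c rest ih =>
    intro stack h
    simp only [List.any_cons, Bool.or_eq_true, beq_iff_eq] at h
    by_cases hp : c = '(' ∨ c = ')'
    · simp [insidemainGoA, hp]
    · have hrest : rest.any (fun c => c == '(' || c == ')') = true := by
        rcases h with h | h
        · exact absurd h hp
        · exact h
      by_cases h1 : c = '{'
      · simp [insidemainGoA, h1, ih _ hrest]
      · by_cases h2 : c = '}'
        · simp only [insidemainGoA, if_neg hp, if_neg h1, if_pos h2]
          cases stack.getLast? with
          | none => rfl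
          | some x => by_cases hx : x = '{' <;> simp [hx, ih _ hrest]
        · simp [insidemainGoA, hp, h1, h2, ih _ hrest]

-- A's stack of n braces behaves like the counter n (paren-free input)
theorem insidemainGoA_eq_bal (l : List Char) :
    ∀ n : Nat, l.any (fun c => c == '(' || c == ')') = false →
      insidemainGoA l (List.replicate n '{') = balAux l n := by
  induction l with
  | nil => intro n _; cases n <;> simp [insidemainGoA, balAux, List.replicate_succ]
  | cons c rest ih =>
    intro n h
    simp only [List.any_cons, Bool.or_eq_false_iff, beq_eq_false_iff_ne, ne_eq] at h
    obtain ⟨⟨hc1, hc2⟩, hrest⟩ := h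
    have hp : ¬ (c = '(' ∨ c = ')') := by tauto
    by_cases h1 : c = '{'
    · have hrep : List.replicate n '{' ++ ['{'] = List.replicate (n + 1) '{' := by
        simp [List.replicate_succ']
      simp [insidemainGoA, balAux, h1, hrep, ih (n + 1) hrest]
    · by_cases h2 : c = '}'
      · simp only [insidemainGoA, balAux, if_neg hp, if_neg h1, if_pos h2]
        cases n with
        | zero => simp
        | succ m =>
          have hlast : (List.replicate (m + 1) '{').getLast? = some '{' := by
            simp [List.getLast?_replicate]
          have hdrop : (List.replicate (m + 1) '{').dropLast = List.replicate m '{' := by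
            simp [List.dropLast_replicate]
          simp [hlast, hdrop, ih m hrest]
      · simp [insidemainGoA, balAux, hp, h1, h2, ih n hrest]

-- the counter ignores filtered-out characters
theorem balAux_filter (l : List Char) :
    ∀ n, l.any (fun c => c == '(' || c == ')') = false →
      balAux (l.filter bKeep) n = balAux l n := by
  induction l with
  | nil => intro n _; rfl
  | cons c rest ih =>
    intro n h
    simp only [List.any_cons, Bool.or_eq_false_iff, beq_eq_false_iff_ne, ne_eq] at h
    obtain ⟨⟨hc1, hc2⟩, hrest⟩ := h
    by_cases hk : bKeep c = true
    · have hb : c = '{' ∨ c = '}' := by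
        simp only [bKeep, Bool.or_eq_true, beq_iff_eq] at hk; tauto
      rcases hb with hb | hb <;> subst hb
      · simp [List.filter_cons, bKeep, balAux, ih _ hrest]
      · cases n <;> simp [List.filter_cons, bKeep, balAux, ih _ hrest]
    · have hno : c ≠ '{' ∧ c ≠ '}' := by
        constructor <;> intro hc <;> subst hc <;> simp [bKeep] at hk
      simp [List.filter_cons, hk, balAux, hno.1, hno.2, ih n hrest]

-- deleting adjacent "{}" pairs preserves the counter run
theorem balAux_replaceAll (t : List Char) : ∀ n, balAux (bReplaceAll t) n = balAux t n := by
  induction t using bReplaceAll.induct with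
  | case1 r ih => intro n; simp [bReplaceAll, balAux, ih n]
  | case2 c r hne ih =>
    intro n
    rw [bReplaceAll.eq_2 c r hne]
    by_cases h1 : c = '{'
    · simp [balAux, h1, ih]
    · by_cases h2 : c = '}'
      · cases n <;> simp [balAux, h1, h2, ih]
      · simp [balAux, h1, h2, ih n]
  | case3 => intro n; rfl

theorem balAux_reduce (t : List Char) : ∀ n, balAux (bReduce t) n = balAux t n := by
  induction t using bReduce.induct with
  | case1 t h ih => intro n; rw [bReduce, dif_pos h, ih n, balAux_replaceAll]
  | case2 t h => intro n; rw [bReduce, dif_neg h]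

theorem bHasPair_reduce (t : List Char) : bHasPair (bReduce t) = false := by
  induction t using bReduce.induct with
  | case1 t h ih => rw [bReduce, dif_pos h]; exact ih
  | case2 t h => rw [bReduce, dif_neg h]; exact Bool.eq_false_iff.mpr h

theorem bReplaceAll_subset (t : List Char) : ∀ c ∈ bReplaceAll t, c ∈ t := by
  induction t using bReplaceAll.induct with
  | case1 r ih =>
    intro c hc
    have hr : c ∈ r := ih c hc
    simp [List.mem_cons, hr]
  | case2 d r hne ih =>
    intro c hc
    rw [bReplaceAll.eq_2 d r hne] at hc
    rcases List.mem_cons.mp hc with hc | hc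
    · simp [hc]
    · simp [List.mem_cons, ih c hc]
  | case3 => intro c hc; simp [bReplaceAll] at hc

theorem bReduce_subset (t : List Char) : ∀ c ∈ bReduce t, c ∈ t := by
  induction t using bReduce.induct with
  | case1 t h ih =>
    intro c hc
    rw [bReduce, dif_pos h] at hc
    exact bReplaceAll_subset t c (ih c hc)
  | case2 t h => intro c hc; rwa [bReduce, dif_neg h] at hc

-- a pair-free brace string starting with '{' is all '{'
theorem allOpen_of_noPair (t : List Char) :
    (∀ c ∈ t, c = '{' ∨ c = '}') → bHasPair ('{' :: t) = false → ∀ c ∈ t, c = '{' := by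
  induction t with
  | nil => intro _ _ c hc; simp at hc
  | cons d r ih =>
    intro hbr hnp c hc
    have hd : d = '{' := by
      rcases hbr d (by simp) with h | h
      · exact h
      · subst h; simp [bHasPair] at hnp
    subst hd
    have hnp' : bHasPair ('{' :: r) = false := by
      simp only [bHasPair, Bool.or_eq_false_iff] at hnp ⊢
      exact hnp.2
    rcases List.mem_cons.mp hc with hc | hc
    · exact hc
    · exact ih (fun c hc => hbr c (List.mem_cons_of_mem _ hc)) hnp' c hc

theorem balAux_allOpen (t : List Char) :
    (∀ c ∈ t, c = '{') → ∀ n, 0 < n → balAux t n = false := by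
  induction t with
  | nil => intro _ n hn; simp [balAux]; omega
  | cons d r ih =>
    intro h n hn
    have hd : d = '{' := h d (by simp)
    simp only [balAux, if_pos hd]
    exact ih (fun c hc => h c (List.mem_cons_of_mem _ hc)) (n + 1) (by omega)

-- at the fixpoint, balance = emptiness
theorem balAux_fixpoint (t : List Char) :
    (∀ c ∈ t, c = '{' ∨ c = '}') → bHasPair t = false → balAux t 0 = (t == []) := by
  intro hbr hnp
  cases t with
  | nil => rfl
  | cons c r =>
    rcases hbr c (by simp) with hc | hc
    · subst hc
      have hall := allOpen_of_noPair r (fun c hc => hbr c (List.mem_cons_of_mem _ hc)) hnp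
      simp [balAux, balAux_allOpen r hall 1 (by omega)]
    · subst hc; simp [balAux]

-- ===== VERDICT (by name: the statement is the Claim_ definition above) =====
theorem insidemain_spec : Claim_equal_insidemain := by
  intro s _
  unfold Spec_insidemain insidemain insidemain_alt
  by_cases h : s.toList.any (fun c => c == '(' || c == ')') = true
  · rw [insidemainGoA_paren _ _ h]
    rcases List.any_eq_true.mp h with ⟨c, hmem, hc⟩
    have hcc : c = '(' ∨ c = ')' := by simpa using hc
    have hk : bKeep c = true := by
      rcases hcc with hc' | hc' <;> simp [bKeep, hc']
    have hmf : c ∈ s.toList.filter bKeep := List.mem_filter.mpr ⟨hmem, hk⟩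
    have hct : ((s.toList.filter bKeep).contains '(' || (s.toList.filter bKeep).contains ')') = true := by
      rcases hcc with hc' | hc' <;>
        · subst hc'
          simp only [List.contains_iff_mem, Bool.or_eq_true, decide_eq_true_eq]
          tauto
    simp only [insidemainAltBody, hct, if_true]
  · have h' : s.toList.any (fun c => c == '(' || c == ')') = false := Bool.eq_false_iff.mpr h
    have hnc : ((s.toList.filter bKeep).contains '(' || (s.toList.filter bKeep).contains ')') = false := by
      rw [Bool.or_eq_false_iff]
      constructor <;>
        · rw [Bool.eq_false_iff]
          intro hc
          rw [List.contains_iff_mem, List.mem_filter] at hc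
          have hx : (s.toList.any fun c => c == '(' || c == ')') = true :=
            List.any_eq_true.mpr ⟨_, hc.1, by decide⟩
          rw [h'] at hx; exact Bool.false_ne_true hx
    simp only [insidemainAltBody, hnc, Bool.false_eq_true, if_false]
    have hA : insidemainGoA s.toList [] = balAux s.toList 0 := by
      simpa using insidemainGoA_eq_bal s.toList 0 h'
    have hbr : ∀ c ∈ bReduce (s.toList.filter bKeep), c = '{' ∨ c = '}' := by
      intro c hc
      have hmem := bReduce_subset _ c hc
      rw [List.mem_filter] at hmem
      have hk := hmem.2
      simp only [bKeep, Bool.or_eq_true, beq_iff_eq] at hk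
      rcases hk with ((h1 | h2) | h3) | h4
      · exfalso
        subst h1
        have hx : (s.toList.any fun c => c == '(' || c == ')') = true :=
          List.any_eq_true.mpr ⟨_, hmem.1, by decide⟩
        rw [h'] at hx; exact Bool.false_ne_true hx
      · exfalso
        subst h2
        have hx : (s.toList.any fun c => c == '(' || c == ')') = true :=
          List.any_eq_true.mpr ⟨_, hmem.1, by decide⟩
        rw [h'] at hx; exact Bool.false_ne_true hx
      · exact Or.inl h3
      · exact Or.inr h4
    rw [hA, ← balAux_filter s.toList 0 h', ← balAux_reduce (s.toList.filter bKeep) 0,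
        balAux_fixpoint _ hbr (bHasPair_reduce _)]
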